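-- pv_equiv track=rewrite | github.com/xenanetworks/xenascriptlibs | layer47/python3/testutils/PacketParse.py | toipv6
-- ===== SOURCE A (Python) =====
-- def toipv6(addr):
--    i = 1
--    p = 0
--    res = ""
--    tmp="0x"
--    for d in addr:
--       if i <= 4 or i >24:
--          tmp+=d
--          if i%4==0:
--             res+=tmp
--             if i < 32:
--                res+=":"
--             tmp=""
--       else:
--          if p == 0:
--             p=1
--             res+=".:"
--       i+=1
--    return res
-- ===== SOURCE B (Python) =====
-- def toipv6(addr):
--     n = len(addr)
--     if n < 4:
--         return ""
--     res = "0x" + addr[:4] + ":"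
--     if n >= 5:
--         res += ".:"
--     if n >= 28:
--         res += addr[24:28] + ":"
--     if n >= 32:
--         res += addr[28:n - n % 4]
--     return res
-- ===== Notes on version B (the rewrite author's own statement) =====
-- stated objective: faster
-- what changed: Replaced A's per-character state machine (counter, flag, pending-group buffer with flush-on-multiple-of-4) by a handful of length-guarded slice concatenations computed directly from len(addr).
import Mathlib
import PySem

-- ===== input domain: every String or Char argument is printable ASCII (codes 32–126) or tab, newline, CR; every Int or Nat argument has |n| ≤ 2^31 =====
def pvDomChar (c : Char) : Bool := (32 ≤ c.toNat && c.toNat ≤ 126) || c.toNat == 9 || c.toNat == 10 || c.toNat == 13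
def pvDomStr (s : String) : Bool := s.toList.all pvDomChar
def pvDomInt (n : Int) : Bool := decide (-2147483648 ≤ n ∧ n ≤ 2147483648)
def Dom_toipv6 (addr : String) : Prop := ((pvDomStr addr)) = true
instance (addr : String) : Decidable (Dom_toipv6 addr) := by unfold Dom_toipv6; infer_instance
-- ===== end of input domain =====

-- B replaces A's char-by-char flushing state machine with length-guarded slices: same return value, simpler structure.


-- ===== PORT A =====
-- A's for-loop over the characters: counter i, flag p, accumulators res/tmp.
def toipv6Loop : List Char → Int → Int → List Char → List Char → List Char
  | [], _, _, res, _ => res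
  | d :: rest, i, p, res, tmp =>
    if i ≤ 4 ∨ 24 < i then
      if PySem.Int.mod i 4 = 0 then
        toipv6Loop rest (i + 1) p (res ++ (tmp ++ [d]) ++ (if i < 32 then [':'] else [])) []
      else
        toipv6Loop rest (i + 1) p res (tmp ++ [d])
    else
      if p = 0 then toipv6Loop rest (i + 1) 1 (res ++ ['.', ':']) tmp
      else toipv6Loop rest (i + 1) p res tmp

def toipv6 (addr : String) : String := String.ofList (toipv6Loop addr.toList 1 0 [] ['0', 'x'])

-- ===== PORT B =====
-- B (Source B): length-guarded slices, over the char list.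
def altList (cs : List Char) : List Char :=
  let n : Int := cs.length
  if n < 4 then [] else
    let res := ['0', 'x'] ++ PySem.List.slice cs none (some 4) ++ [':']
    let res := if 5 ≤ n then res ++ ['.', ':'] else res
    let res := if 28 ≤ n then res ++ PySem.List.slice cs (some 24) (some 28) ++ [':'] else res
    if 32 ≤ n then res ++ PySem.List.slice cs (some 28) (some (n - PySem.Int.mod n 4)) else res

def toipv6_alt (addr : String) : String := String.ofList (altList addr.toList)

-- ===== PRECONDITION & SPEC =====
def Spec_toipv6 (addr : String) (out : String) : Prop := out = toipv6_alt addr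
instance (addr : String) (out : String) : Decidable (Spec_toipv6 addr out) := by unfold Spec_toipv6; infer_instance

-- ===== CLAIM (what is proved, stated in full; the proofs are below) =====
def Claim_equal_toipv6 : Prop := ∀ (addr : String), Dom_toipv6 addr → Spec_toipv6 addr (toipv6 addr)

-- ===== LEMMAS AND PROOFS =====

lemma modP (i : Int) : PySem.Int.mod i 4 = i % 4 := PySem.Int.mod_eq_emod_of_pos (by norm_num)
lemma step_flush (d : Char) (rest : List Char) (i p : Int) (res tmp : List Char)
    (h1 : i ≤ 4 ∨ 24 < i) (h2 : i % 4 = 0) :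
    toipv6Loop (d :: rest) i p res tmp
      = toipv6Loop rest (i + 1) p (res ++ (tmp ++ [d]) ++ (if i < 32 then [':'] else [])) [] := by
  simp [toipv6Loop, h1, h2]
lemma step_acc (d : Char) (rest : List Char) (i p : Int) (res tmp : List Char)
    (h1 : i ≤ 4 ∨ 24 < i) (h2 : i % 4 ≠ 0) :
    toipv6Loop (d :: rest) i p res tmp = toipv6Loop rest (i + 1) p res (tmp ++ [d]) := by
  simp [toipv6Loop, h1, h2]
lemma step_skip1 (d : Char) (rest : List Char) (i : Int) (res tmp : List Char)
    (h1 : ¬(i ≤ 4 ∨ 24 < i)) :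
    toipv6Loop (d :: rest) i 0 res tmp = toipv6Loop rest (i + 1) 1 (res ++ ['.', ':']) tmp := by
  simp [toipv6Loop, h1]
lemma step_skip (d : Char) (rest : List Char) (i : Int) (res tmp : List Char)
    (h1 : ¬(i ≤ 4 ∨ 24 < i)) :
    toipv6Loop (d :: rest) i 1 res tmp = toipv6Loop rest (i + 1) 1 res tmp := by
  simp [toipv6Loop, h1]
lemma chunk4 (blk rest : List Char) (hb : blk.length = 4) (i p : Int) (res tmp : List Char)
    (hreg : i = 1 ∨ 25 ≤ i) (hmod : i % 4 = 1) :
    toipv6Loop (blk ++ rest) i p res tmp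
      = toipv6Loop rest (i + 4) p (res ++ tmp ++ blk ++ (if i + 3 < 32 then [':'] else [])) [] := by
  rcases blk with _ | ⟨a, _ | ⟨b, _ | ⟨c, _ | ⟨d, tl⟩⟩⟩⟩ <;> simp at hb
  subst hb
  rw [List.cons_append, List.cons_append, List.cons_append, List.cons_append, List.nil_append,
    step_acc _ _ _ _ _ _ (by omega) (by omega),
    step_acc _ _ _ _ _ _ (by omega) (by omega),
    step_acc _ _ _ _ _ _ (by omega) (by omega),
    step_flush _ _ _ _ _ _ (by omega) (by omega)]
  have : i + 1 + 1 + 1 + 1 = i + 4 := by ring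
  rw [this]
  congr 1
  by_cases h32 : i + 3 < 32
  · rw [if_pos h32, if_pos (by omega)]; simp
  · rw [if_neg h32, if_neg (by omega)]; simp
lemma shortEnd (cs : List Char) (hc : cs.length ≤ 3) (i p : Int) (res tmp : List Char)
    (hreg : i = 1 ∨ 25 ≤ i) (hmod : i % 4 = 1) :
    toipv6Loop cs i p res tmp = res := by
  rcases cs with _ | ⟨a, _ | ⟨b, _ | ⟨c, _ | ⟨d, tl⟩⟩⟩⟩
  · rfl
  · rw [step_acc _ _ _ _ _ _ (by omega) (by omega)]; rfl
  · rw [step_acc _ _ _ _ _ _ (by omega) (by omega),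
      step_acc _ _ _ _ _ _ (by omega) (by omega)]; rfl
  · rw [step_acc _ _ _ _ _ _ (by omega) (by omega),
      step_acc _ _ _ _ _ _ (by omega) (by omega),
      step_acc _ _ _ _ _ _ (by omega) (by omega)]; rfl
  · simp at hc; omega
lemma skipRun (cs0 : List Char) : ∀ (rest : List Char) (i : Int) (res tmp : List Char),
    5 ≤ i → i + cs0.length ≤ 25 →
    toipv6Loop (cs0 ++ rest) i 1 res tmp = toipv6Loop rest (i + cs0.length) 1 res tmp := by
  induction cs0 with
  | nil => intro rest i res tmp _ _; simp
  | cons c cs ih =>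
    intro rest i res tmp h5 h25
    simp only [List.length_cons] at h25 ⊢
    rw [List.cons_append, step_skip _ _ _ _ _ (by omega), ih rest (i + 1) res tmp (by omega) (by push_cast; omega)]
    congr 1
    push_cast
    ring
def grp : List Char → List Char
  | a :: b :: c :: d :: r => a :: b :: c :: d :: grp r
  | _ => []
lemma tailRun : ∀ (cs : List Char) (i p : Int) (res : List Char), 33 ≤ i → i % 4 = 1 →
    toipv6Loop cs i p res [] = res ++ grp cs := by
  intro cs
  induction cs using grp.induct with
  | case1 a b c d r ih =>
    intro i p res h33 hmod
    rw [step_acc _ _ _ _ _ _ (by omega) (by omega),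
      step_acc _ _ _ _ _ _ (by omega) (by omega),
      step_acc _ _ _ _ _ _ (by omega) (by omega),
      step_flush _ _ _ _ _ _ (by omega) (by omega),
      if_neg (by omega), ih _ p _ (by omega) (by omega)]
    simp [grp]
  | case2 cs h =>
    intro i p res h33 hmod
    have hlen : cs.length ≤ 3 := by
      rcases cs with _ | ⟨a, _ | ⟨b, _ | ⟨c, _ | ⟨d, tl⟩⟩⟩⟩ <;> simp_all
      exact absurd rfl (h a b c d tl rfl rfl rfl rfl)
    rw [shortEnd cs hlen i p res [] (by omega) (by omega)]
    have : grp cs = [] := by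
      rcases cs with _ | ⟨a, _ | ⟨b, _ | ⟨c, _ | ⟨d, tl⟩⟩⟩⟩ <;> simp_all [grp] <;> omega
    simp [this]
lemma grp_eq (cs : List Char) : grp cs = cs.take (cs.length - cs.length % 4) := by
  induction cs using grp.induct with
  | case1 a b c d r ih =>
    simp only [grp, List.length_cons]
    have h1 : r.length % 4 ≤ r.length := Nat.mod_le _ _
    have : r.length + 1 + 1 + 1 + 1 - (r.length + 1 + 1 + 1 + 1) % 4
        = (r.length - r.length % 4) + 4 := by omega
    rw [this, ih, show (r.length - r.length % 4) + 4 = (((r.length - r.length % 4) + 1) + 1 + 1) + 1 from by omega,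
      List.take_succ_cons, List.take_succ_cons, List.take_succ_cons, List.take_succ_cons]
  | case2 cs h =>
    have hlen : cs.length ≤ 3 := by
      rcases cs with _ | ⟨a, _ | ⟨b, _ | ⟨c, _ | ⟨d, tl⟩⟩⟩⟩ <;> simp_all
      exact absurd rfl (h a b c d tl rfl rfl rfl rfl)
    have hg : grp cs = [] := by
      rcases cs with _ | ⟨a, _ | ⟨b, _ | ⟨c, _ | ⟨d, tl⟩⟩⟩⟩ <;> simp_all [grp] <;> omega
    rw [hg, Nat.sub_eq_zero_of_le (Nat.le_of_eq (Nat.mod_eq_of_lt (by omega)).symm), List.take_zero]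

lemma endNil (i p : Int) (res tmp : List Char) : toipv6Loop [] i p res tmp = res := rfl

lemma slice4 (cs : List Char) : PySem.List.slice cs none (some 4) = cs.take 4 := by
  rw [PySem.List.slice_to cs (by norm_num)]; simp

lemma slice2428 (cs : List Char) : PySem.List.slice cs (some 24) (some 28) = (cs.drop 24).take 4 := by
  rw [PySem.List.slice_toNat cs (by norm_num) (by norm_num)]; simp

lemma sliceTail (cs : List Char) (h : 32 ≤ cs.length) :
    PySem.List.slice cs (some 28) (some ((cs.length : Int) - PySem.Int.mod (cs.length : Int) 4))
      = (cs.drop 28).take 4 ++ grp (cs.drop 32) := by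
  rw [modP, PySem.List.slice_toNat cs (by norm_num) (by omega)]
  have h1 : (((cs.length : Int) - (cs.length : Int) % 4).toNat - (28 : Int).toNat)
      = 4 + ((cs.drop 32).length - (cs.drop 32).length % 4) := by
    simp only [List.length_drop]; omega
  rw [h1, List.take_add, grp_eq]
  simp [List.drop_drop]

theorem mainList (cs : List Char) : toipv6Loop cs 1 0 [] ['0', 'x'] = altList cs := by
  by_cases h4 : cs.length < 4
  · rw [shortEnd cs (by omega) 1 0 _ _ (Or.inl rfl) (by decide)]
    have c4 : ((cs.length : Int)) < 4 := by omega
    simp [altList, c4]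
  · push_neg at h4
    conv_lhs => rw [← List.take_append_drop 4 cs]
    rw [chunk4 _ _ (by simp; omega) 1 0 [] ['0', 'x'] (Or.inl rfl) (by decide),
      show (1 : Int) + 4 = 5 from by norm_num, if_pos (by norm_num), List.nil_append]
    have c4 : ¬((cs.length : Int) < 4) := by omega
    by_cases h5 : cs.length < 5
    · rw [List.drop_eq_nil_of_le (by omega), endNil]
      have c5 : ¬(5 ≤ (cs.length : Int)) := by omega
      simp [altList, c4, c5, slice4, show ¬(28 ≤ (cs.length : Int)) from by omega,
        show ¬(32 ≤ (cs.length : Int)) from by omega]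
    · push_neg at h5
      rw [List.drop_eq_getElem_cons (by omega), step_skip1 _ _ _ _ _ (by norm_num),
        show (5 : Int) + 1 = 6 from by norm_num]
      conv_lhs => rw [← List.take_append_drop 19 (cs.drop 5)]
      rw [skipRun _ _ 6 _ _ (by norm_num) (by simp; omega), List.drop_drop]
      have c5 : (5 ≤ (cs.length : Int)) := by omega
      by_cases h25 : cs.length < 25
      · rw [show 5 + 19 = 24 from rfl, List.drop_eq_nil_of_le (by omega), endNil]
        simp [altList, c4, c5, slice4, show ¬(28 ≤ (cs.length : Int)) from by omega,
          show ¬(32 ≤ (cs.length : Int)) from by omega]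
      · push_neg at h25
        rw [show 5 + 19 = 24 from rfl,
          show (6 : Int) + ((List.take 19 (cs.drop 5)).length : Int) = 25 from by simp; omega]
        by_cases h28 : cs.length < 28
        · rw [shortEnd _ (by simp; omega) 25 1 _ _ (Or.inr (by norm_num)) (by decide)]
          simp [altList, c4, c5, slice4, show ¬(28 ≤ (cs.length : Int)) from by omega,
            show ¬(32 ≤ (cs.length : Int)) from by omega]
        · push_neg at h28
          conv_lhs => rw [← List.take_append_drop 4 (cs.drop 24)]
          rw [chunk4 _ _ (by simp; omega) 25 1 _ [] (Or.inr (by norm_num)) (by decide),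
            show (25 : Int) + 4 = 29 from by norm_num, if_pos (by norm_num), List.drop_drop,
            show 4 + 24 = 28 from rfl]
          have c28 : (28 ≤ (cs.length : Int)) := by omega
          by_cases h32 : cs.length < 32
          · rw [shortEnd _ (by simp; omega) 29 1 _ _ (Or.inr (by norm_num)) (by decide)]
            simp [altList, c4, c5, c28, slice4, slice2428,
              show ¬(32 ≤ (cs.length : Int)) from by omega]
          · push_neg at h32
            conv_lhs => rw [← List.take_append_drop 4 (cs.drop 28)]
            rw [chunk4 _ _ (by simp; omega) 29 1 _ [] (Or.inr (by norm_num)) (by decide),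
              show (29 : Int) + 4 = 33 from by norm_num, if_neg (by norm_num), List.drop_drop,
              show 4 + 28 = 32 from rfl, tailRun _ 33 1 _ (by norm_num) (by decide)]
            simp [altList, c4, c5, c28, slice4, slice2428,
              show (32 ≤ (cs.length : Int)) from by omega]
            rw [show ((cs.length : Int) % 4) = PySem.Int.mod (cs.length : Int) 4 from (modP _).symm,
              sliceTail cs h32]

-- ===== VERDICT (by name: the statement is the Claim_ definition above) =====
theorem toipv6_spec : Claim_equal_toipv6 := by
  intro addr _
  show toipv6 addr = toipv6_alt addr
  simp only [toipv6, toipv6_alt, mainList]
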